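-- pv_equiv track=rewrite | github.com/slidracoon72/leetcode | OAs/Cisco_SWE2_2025.py | funcChessBoard
-- ===== SOURCE A (Python) =====
-- def funcChessBoard(inputNum):
--     res = []
--     for i in range(inputNum):
--         row = []
--         for j in range(inputNum):
--             # Determine the color of the square
--             if (i + j) % 2 == 0:
--                 row.append("W")
--             else:
--                 row.append("B")
--         res.append("".join(row))
--     return res
-- ===== SOURCE B (Python) =====
-- def funcChessBoard(inputNum):
--     # Precompute the only two possible rows, then select per row index.
--     reps = (inputNum + 1) // 2
--     evenRow = ("WB" * reps)[:inputNum]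
--     oddRow = ("BW" * reps)[:inputNum]
--     return [evenRow if i % 2 == 0 else oddRow for i in range(inputNum)]
-- ===== Notes on version B (the rewrite author's own statement) =====
-- stated objective: simpler
-- what changed: Replaces the per-cell nested loop with a precompute-two-row-templates-then-select decomposition: the two alternating rows are built once by string repetition and truncation, and the result is one comprehension choosing a template by row parity.
import Mathlib
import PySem

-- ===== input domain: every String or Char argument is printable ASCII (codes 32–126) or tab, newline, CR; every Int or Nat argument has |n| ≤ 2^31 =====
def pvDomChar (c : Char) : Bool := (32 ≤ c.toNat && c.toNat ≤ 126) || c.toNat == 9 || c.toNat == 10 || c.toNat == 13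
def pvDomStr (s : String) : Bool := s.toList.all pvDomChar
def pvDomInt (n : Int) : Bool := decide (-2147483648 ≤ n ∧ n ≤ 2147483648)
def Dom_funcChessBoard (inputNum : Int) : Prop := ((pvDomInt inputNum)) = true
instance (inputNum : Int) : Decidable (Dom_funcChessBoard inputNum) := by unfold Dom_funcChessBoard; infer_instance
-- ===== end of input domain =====

-- B replaces A's per-cell nested loop by precomputing the two alternating row templates
-- (string repetition + truncation) and selecting one per row index (objective: simpler).


-- ===== PORT A =====
-- for i in range(n): for j in range(n): append 'W'/'B' by (i+j) % 2; join each row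
def funcChessBoard (inputNum : Int) : List String :=
  (PySem.List.pyRange 0 inputNum 1).foldl (fun res i =>
    res ++ [String.ofList ((PySem.List.pyRange 0 inputNum 1).foldl
      (fun row j => row ++ [if PySem.Int.mod (i + j) 2 = 0 then 'W' else 'B']) [])]) []

-- ===== PORT B =====
-- reps = (n+1)//2; evenRow = ("WB"*reps)[:n]; oddRow = ("BW"*reps)[:n];
-- [evenRow if i % 2 == 0 else oddRow for i in range(n)]
def funcChessBoard_alt (inputNum : Int) : List String :=
  let reps := PySem.Int.floordiv (inputNum + 1) 2
  let evenRow := String.ofList (PySem.List.slice (List.replicate reps.toNat ['W', 'B']).flatten none (some inputNum))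
  let oddRow := String.ofList (PySem.List.slice (List.replicate reps.toNat ['B', 'W']).flatten none (some inputNum))
  (PySem.List.pyRange 0 inputNum 1).map (fun i => if PySem.Int.mod i 2 = 0 then evenRow else oddRow)

-- ===== PRECONDITION & SPEC =====
def Spec_funcChessBoard (inputNum : Int) (out : List String) : Prop := out = funcChessBoard_alt inputNum
instance (inputNum : Int) (out : List String) : Decidable (Spec_funcChessBoard inputNum out) := by unfold Spec_funcChessBoard; infer_instance

-- ===== CLAIM (what is proved, stated in full; the proofs are below) =====
def Claim_equal_funcChessBoard : Prop := ∀ (inputNum : Int), Dom_funcChessBoard inputNum → Spec_funcChessBoard inputNum (funcChessBoard inputNum)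

-- ===== LEMMAS AND PROOFS =====

/-- Canonical alternating row: `altRow m b` has length `m`, starting with 'W' iff `b`. -/
def altRow : Nat → Bool → List Char
  | 0, _ => []
  | m + 1, b => (if b then 'W' else 'B') :: altRow m (!b)

theorem foldl_snoc {α β : Type} (f : α → β) :
    ∀ (l : List α) (acc : List β),
      l.foldl (fun r x => r ++ [f x]) acc = acc ++ l.map f := by
  intro l
  induction l with
  | nil => simp
  | cons x xs ih => intro acc; simp [List.foldl, ih]

theorem mod_two_flip (x : Int) :
    decide (PySem.Int.mod (x + 1) 2 = 0) = !decide (PySem.Int.mod x 2 = 0) := by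
  simp only [PySem.Int.mod_eq_emod_of_pos (by omega : (0:Int) < 2)]
  by_cases h : x % 2 = 0
  · have h1 : ¬ ((x + 1) % 2 = 0) := by omega
    simp [h, h1]
  · have h1 : (x + 1) % 2 = 0 := by omega
    simp [h, h1]

theorem map_parity_eq_altRow (i : Int) :
    ∀ (m : Nat) (a : Int),
      (PySem.List.pyRange a (a + m) 1).map
        (fun j => if PySem.Int.mod (i + j) 2 = 0 then 'W' else 'B')
      = altRow m (decide (PySem.Int.mod (i + a) 2 = 0)) := by
  intro m
  induction m with
  | zero => intro a; simp only [Nat.cast_zero, add_zero,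
      PySem.List.pyRange_one_eq_nil (le_refl a), List.map_nil, altRow]
  | succ m ih =>
    intro a
    rw [PySem.List.pyRange_one_cons (by omega : a < a + ((m : Nat) + 1 : Nat)),
        show a + ((m : Nat) + 1 : Nat) = (a + 1) + (m : Nat) by push_cast; ring]
    simp only [List.map_cons, ih (a + 1), altRow]
    rw [show i + (a + 1) = (i + a) + 1 by ring, mod_two_flip (i + a)]
    by_cases h : PySem.Int.mod (i + a) 2 = 0
    · rw [if_pos h, decide_eq_true h]; rfl
    · rw [if_neg h, decide_eq_false h]; rfl

theorem flatten_replicate_WB :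
    ∀ (k : Nat), (List.replicate k ['W', 'B']).flatten = altRow (2 * k) true := by
  intro k
  induction k with
  | zero => simp [altRow]
  | succ k ih =>
    rw [List.replicate_succ, List.flatten_cons, ih,
        show 2 * (k + 1) = (2 * k) + 1 + 1 by ring]
    simp [altRow]

theorem flatten_replicate_BW :
    ∀ (k : Nat), (List.replicate k ['B', 'W']).flatten = altRow (2 * k) false := by
  intro k
  induction k with
  | zero => simp [altRow]
  | succ k ih =>
    rw [List.replicate_succ, List.flatten_cons, ih,
        show 2 * (k + 1) = (2 * k) + 1 + 1 by ring]
    simp [altRow]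

theorem take_altRow : ∀ (m M : Nat) (b : Bool), m ≤ M →
    (altRow M b).take m = altRow m b := by
  intro m
  induction m with
  | zero => intro M b _; simp [altRow]
  | succ m ih =>
    intro M b h
    cases M with
    | zero => omega
    | succ M => simp [altRow, ih M (!b) (by omega)]

theorem funcChessBoard_spec : Claim_equal_funcChessBoard := by
  unfold Claim_equal_funcChessBoard Spec_funcChessBoard
  intro n _
  unfold funcChessBoard funcChessBoard_alt
  by_cases hn : n ≤ 0
  · simp [PySem.List.pyRange_one_eq_nil hn]
  · rw [foldl_snoc, List.nil_append]
    have hrep : n.toNat ≤ 2 * (PySem.Int.floordiv (n + 1) 2).toNat := by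
      rw [PySem.Int.floordiv_eq_ediv_of_pos (by omega : (0:Int) < 2)]
      omega
    have hEven : PySem.List.slice
        (List.replicate (PySem.Int.floordiv (n + 1) 2).toNat ['W', 'B']).flatten
          none (some n) = altRow n.toNat true := by
      rw [PySem.List.slice_to _ (by omega : (0:Int) ≤ n), flatten_replicate_WB,
          take_altRow _ _ _ hrep]
    have hOdd : PySem.List.slice
        (List.replicate (PySem.Int.floordiv (n + 1) 2).toNat ['B', 'W']).flatten
          none (some n) = altRow n.toNat false := by
      rw [PySem.List.slice_to _ (by omega : (0:Int) ≤ n), flatten_replicate_BW,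
          take_altRow _ _ _ hrep]
    simp only [hEven, hOdd]
    apply List.map_congr_left
    intro i _
    rw [foldl_snoc, List.nil_append,
        show PySem.List.pyRange 0 n 1 = PySem.List.pyRange 0 (0 + (n.toNat : Nat)) 1 by
          rw [Int.zero_add]; congr 1; omega,
        map_parity_eq_altRow i n.toNat 0, Int.add_zero]
    by_cases h : PySem.Int.mod i 2 = 0
    · rw [if_pos h, decide_eq_true h]
    · rw [if_neg h, decide_eq_false h]
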